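-- pv_equiv track=rewrite | github.com/dinnerparty718/leetpy | Binary_Search/longest_repeating_substring.py | f
-- ===== SOURCE A (Python) =====
-- def f(s, n) -> bool:
--     seen = set()
--     for i in range(len(s) - n + 1):
--         sub = s[i:i+n]
--         if sub in seen:
--             return True
--         else:
--             seen.add(sub)
--
--     return False
-- ===== SOURCE B (Python) =====
-- def f(s, n) -> bool:
--     return any(s[i:i+n] == s[j:j+n]
--                for i in range(len(s) - n + 1)
--                for j in range(i))
-- ===== Notes on version B (the rewrite author's own statement) =====
-- stated objective: alternative
-- what changed: Replaces A's stateful seen-set loop with a stateless lazy scan over pairs of positions: any(s[i:i+n] == s[j:j+n] for i, j<i), recomputing slices instead of storing them in a set.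
import Mathlib
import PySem

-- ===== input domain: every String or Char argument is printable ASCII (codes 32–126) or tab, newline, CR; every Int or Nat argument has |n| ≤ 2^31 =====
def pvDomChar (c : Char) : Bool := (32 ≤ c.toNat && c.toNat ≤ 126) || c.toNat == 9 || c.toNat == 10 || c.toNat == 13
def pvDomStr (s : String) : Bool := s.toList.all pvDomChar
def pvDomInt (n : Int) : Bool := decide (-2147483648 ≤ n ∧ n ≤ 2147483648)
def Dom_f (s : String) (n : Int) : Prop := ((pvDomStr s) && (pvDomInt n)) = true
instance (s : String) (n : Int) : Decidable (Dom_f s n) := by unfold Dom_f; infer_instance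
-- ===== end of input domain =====

-- B replaces A's seen-set loop by a direct lazy scan over pairs of positions
-- (any two positions with equal length-n slices); same return value, no speed claim.

-- ===== PORT A =====
-- 'for i in range(len(s)-n+1): sub = s[i:i+n]; if sub in seen: return True; else seen.add(sub)'
-- (range is consumed lazily, as in Python: i counts up to stop, returning at the first repeat)
def fLoop (s : String) (n : Int) (stop : Int) (seen : PySem.Set String) (i : Int) : Bool :=
  if h : i < stop then
    let sub := PySem.Str.slice s (some i) (some (i + n))
    if PySem.Set.contains seen sub then true
    else fLoop s n stop (PySem.Set.add seen sub) (i + 1)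
  else false
termination_by (stop - i).toNat
decreasing_by omega

def f (s : String) (n : Int) : Bool :=
  fLoop s n ((PySem.Str.len s : Int) - n + 1) PySem.Set.empty 0

-- ===== PORT B =====
-- any(s[i:i+n] == s[j:j+n] for i in range(len(s)-n+1) for j in range(i))
-- (both generators consumed lazily, stopping at the first equal pair)
def fAltInner (s : String) (n : Int) (i : Int) (j : Int) : Bool :=
  if h : j < i then
    if PySem.Str.slice s (some i) (some (i + n)) == PySem.Str.slice s (some j) (some (j + n))
      then true
      else fAltInner s n i (j + 1)
  else false
termination_by (i - j).toNat
decreasing_by omega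

def fAltOuter (s : String) (n : Int) (stop : Int) (i : Int) : Bool :=
  if h : i < stop then
    if fAltInner s n i 0 then true else fAltOuter s n stop (i + 1)
  else false
termination_by (stop - i).toNat
decreasing_by omega

def f_alt (s : String) (n : Int) : Bool :=
  fAltOuter s n ((PySem.Str.len s : Int) - n + 1) 0

-- ===== PRECONDITION & SPEC =====
def Spec_f (s : String) (n : Int) (out : Bool) : Prop := out = f_alt s n
instance (s : String) (n : Int) (out : Bool) : Decidable (Spec_f s n out) := by unfold Spec_f; infer_instance

-- ===== CLAIM (what is proved, stated in full; the proofs are below) =====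
def Claim_equal_f : Prop := ∀ (s : String) (n : Int), Dom_f s n → Spec_f s n (f s n)

-- ===== LEMMAS AND PROOFS =====

-- shifting one freshly added element out of the seen set
theorem seen_add_shift (a : String) (l : List String) (seen : PySem.Set String) (h : a ∉ seen) :
    (¬ l.Nodup ∨ ∃ x ∈ l, x ∈ PySem.Set.add seen a) ↔
    (¬ (a ∉ l ∧ l.Nodup) ∨ ∃ x, (x = a ∨ x ∈ l) ∧ x ∈ seen) := by
  simp only [PySem.Set.mem_add]
  constructor
  · rintro (h1 | ⟨x, hx, hs | he⟩)
    · tauto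
    · exact Or.inr ⟨x, Or.inr hx, hs⟩
    · subst he; tauto
  · rintro (h1 | ⟨x, he | hx, hs⟩)
    · by_cases hm : a ∈ l
      · exact Or.inr ⟨a, hm, Or.inr rfl⟩
      · tauto
    · subst he; tauto
    · exact Or.inr ⟨x, hx, Or.inl hs⟩

-- A's loop returns true iff the remaining slice list contains a duplicate, or hits the seen set.
theorem fLoop_true_iff (s : String) (n : Int) (stop : Int) :
    ∀ (k : Nat) (i : Int) (seen : PySem.Set String), (stop - i).toNat = k →
    (fLoop s n stop seen i = true ↔
      ¬ ((PySem.List.pyRange i stop 1).map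
          (fun j => PySem.Str.slice s (some j) (some (j + n)))).Nodup ∨
      ∃ x ∈ (PySem.List.pyRange i stop 1).map
          (fun j => PySem.Str.slice s (some j) (some (j + n))), x ∈ seen) := by
  intro k
  induction k with
  | zero =>
      intro i seen hk
      have hge : stop ≤ i := by omega
      rw [fLoop, dif_neg (by omega), PySem.List.pyRange_one]
      simp [Int.toNat_of_nonpos (by omega : stop - i ≤ 0)]
  | succ k ih =>
      intro i seen hk
      by_cases hlt : i < stop
      · rw [fLoop, dif_pos hlt, PySem.List.pyRange_one_cons hlt, List.map_cons,
          List.nodup_cons]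
        simp only [List.mem_cons]
        by_cases h : PySem.Str.slice s (some i) (some (i + n)) ∈ seen
        · rw [if_pos ((PySem.Set.contains_iff seen _).mpr h)]
          simp only [true_iff]
          exact Or.inr ⟨_, Or.inl rfl, h⟩
        · rw [if_neg (fun hc => h ((PySem.Set.contains_iff seen _).mp hc)),
            ih (i + 1) _ (by omega)]
          exact seen_add_shift _ _ seen h
      · omega

-- B's inner generator: some j in [j0, i) has the same slice as i.
theorem fAltInner_true_iff (s : String) (n : Int) (i : Int) :
    ∀ (k : Nat) (j0 : Int), (i - j0).toNat = k →
    (fAltInner s n i j0 = true ↔ ∃ j : Int, j0 ≤ j ∧ j < i ∧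
      PySem.Str.slice s (some i) (some (i + n)) = PySem.Str.slice s (some j) (some (j + n))) := by
  intro k
  induction k with
  | zero =>
      intro j0 hk
      rw [fAltInner, dif_neg (by omega)]
      simp only [Bool.false_eq_true, false_iff]
      rintro ⟨j, h1, h2, -⟩; omega
  | succ k ih =>
      intro j0 hk
      by_cases hlt : j0 < i
      · rw [fAltInner, dif_pos hlt]
        by_cases he : PySem.Str.slice s (some i) (some (i + n)) =
            PySem.Str.slice s (some j0) (some (j0 + n))
        · rw [if_pos (by simpa using he)]
          simp only [true_iff]
          exact ⟨j0, le_refl _, hlt, he⟩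
        · rw [if_neg (by simpa using he), ih (j0 + 1) (by omega)]
          constructor
          · rintro ⟨j, h1, h2, h3⟩; exact ⟨j, by omega, h2, h3⟩
          · rintro ⟨j, h1, h2, h3⟩
            refine ⟨j, by_contra fun hc => ?_, h2, h3⟩
            have : j = j0 := by omega
            exact he (this ▸ h3)
      · omega

-- B's outer generator: some pair j < i (with i0 ≤ i < stop) has equal slices.
theorem fAltOuter_true_iff (s : String) (n : Int) (stop : Int) :
    ∀ (k : Nat) (i0 : Int), (stop - i0).toNat = k →
    (fAltOuter s n stop i0 = true ↔ ∃ i : Int, i0 ≤ i ∧ i < stop ∧ ∃ j : Int, 0 ≤ j ∧ j < i ∧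
      PySem.Str.slice s (some i) (some (i + n)) = PySem.Str.slice s (some j) (some (j + n))) := by
  intro k
  induction k with
  | zero =>
      intro i0 hk
      rw [fAltOuter, dif_neg (by omega)]
      simp only [Bool.false_eq_true, false_iff]
      rintro ⟨i, h1, h2, -⟩; omega
  | succ k ih =>
      intro i0 hk
      by_cases hlt : i0 < stop
      · rw [fAltOuter, dif_pos hlt]
        by_cases hin : fAltInner s n i0 0 = true
        · rw [if_pos hin]
          simp only [true_iff]
          obtain ⟨j, h1, h2, h3⟩ := (fAltInner_true_iff s n i0 (i0 - 0).toNat 0 rfl).mp hin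
          exact ⟨i0, le_refl _, hlt, j, h1, h2, h3⟩
        · rw [if_neg (by simpa using hin), ih (i0 + 1) (by omega)]
          constructor
          · rintro ⟨i, h1, h2, h3⟩; exact ⟨i, by omega, h2, h3⟩
          · rintro ⟨i, h1, h2, j, hj1, hj2, hj3⟩
            refine ⟨i, by_contra fun hc => ?_, h2, j, hj1, hj2, hj3⟩
            have : i = i0 := by omega
            subst this
            exact hin ((fAltInner_true_iff s n i (i - 0).toNat 0 rfl).mpr ⟨j, hj1, hj2, hj3⟩)
      · omega

-- a duplicate in the list of slices over range(stop) IS an equal pair of positions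
theorem nodup_slices_iff (s : String) (n : Int) (stop : Int) :
    (¬ ((PySem.List.pyRange 0 stop 1).map
        (fun j => PySem.Str.slice s (some j) (some (j + n)))).Nodup) ↔
    ∃ i : Int, 0 ≤ i ∧ i < stop ∧ ∃ j : Int, 0 ≤ j ∧ j < i ∧
      PySem.Str.slice s (some i) (some (i + n)) = PySem.Str.slice s (some j) (some (j + n)) := by
  rw [List.Nodup, List.pairwise_map, List.pairwise_iff_getElem]
  simp only [PySem.List.length_pyRange_one, PySem.List.getElem_pyRange_one, zero_add]
  constructor
  · intro h
    push Not at h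
    obtain ⟨p, q, hp, hq, hpq, he⟩ := h
    refine ⟨(q : Int), by omega, by omega, (p : Int), by omega, by exact_mod_cast hpq, ?_⟩
    simpa using he.symm
  · rintro ⟨i, hi0, his, j, hj0, hji, he⟩
    intro h
    have := h j.toNat i.toNat (by omega) (by omega) (by omega)
    apply this
    rw [show ((j.toNat : Int)) = j by omega, show ((i.toNat : Int)) = i by omega]
    exact he.symm

-- ===== VERDICT (by name: the statement is the Claim_ definition above) =====
theorem f_spec : Claim_equal_f := by
  intro s n _
  show f s n = f_alt s n
  apply Bool.coe_iff_coe.mp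
  rw [f, fLoop_true_iff s n _ _ 0 _ rfl, f_alt,
    fAltOuter_true_iff s n _ _ 0 rfl, ← nodup_slices_iff]
  simp [PySem.Set.empty]
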